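-- pv_equiv track=rewrite | github.com/donghyuk454/pccp-study | lv3/rogue-user.py | solution
-- ===== SOURCE A (Python) =====
-- from copy import deepcopy
--
-- def solution(user_id, banned_id):
--     answer = 0
--     ban_candidates = dict()
--
--     for ban in banned_id:
--         if ban in ban_candidates:
--             continue
--         ban_candidates[ban] = []
--         for user in user_id:
--             if check_is_candidate(ban, user):
--                 ban_candidates[ban].append(user)
--
--     def find(visited, ban_idx, route):
--         if ban_idx == len(banned_id):
--             return [route]
--
--         candidates = ban_candidates[banned_id[ban_idx]]
--         result = []
--         for cand in candidates:
--             if visited[cand]: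
--                 continue
--             new_visited = deepcopy(visited)
--             new_visited[cand] = True
--             new_route = deepcopy(route)
--             new_route.append(cand)
--             result += find(new_visited, ban_idx+1, new_route)
--
--         return result
--
--     new_visited = dict()
--     for user in user_id:
--         new_visited[user] = False
--     result = find(new_visited, 0, [])
--
--     for i in range(len(result)):
--         result[i].sort()
--     temp = []
--     for r in result:
--         route_str = ""
--         for i in r:
--             route_str += i
--         temp.append(route_str)
--
--     answer = len(list(set(temp)))
--
--     return answer
--
-- def check_is_candidate(ban, user):
--     if len(user) != len(ban):
--         return False
--
--     for i in range(len(ban)):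
--         if ban[i] == '*':
--             continue
--         if user[i] != ban[i]:
--             return False
--     return True
-- ===== SOURCE B (Python) =====
-- def solution(user_id, banned_id):
--     # Layered BFS over deduplicated partial assignments: each level extends every
--     # canonical (sorted-tuple) partial state by one user matching the next pattern,
--     # merging states that use the same set of users as soon as they arise.
--     users = list(dict.fromkeys(user_id))
--     states = {()}
--     for ban in banned_id:
--         cand = [u for u in users
--                 if len(u) == len(ban)
--                 and all(b == '*' or b == c for b, c in zip(ban, u))]
--         states = {tuple(sorted(s + (u,))) for s in states for u in cand if u not in s}
--     return len({"".join(s) for s in states})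
-- ===== Notes on version B (the rewrite author's own statement) =====
-- stated objective: alternative
-- what changed: B replaces A's recursive DFS that enumerates every ordered route (deep-copying visited/route per node and deduplicating only at the end) with an iterative level-by-level BFS over canonical sorted partial assignments, merging states that use the same set of users at each level.
import Mathlib
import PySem

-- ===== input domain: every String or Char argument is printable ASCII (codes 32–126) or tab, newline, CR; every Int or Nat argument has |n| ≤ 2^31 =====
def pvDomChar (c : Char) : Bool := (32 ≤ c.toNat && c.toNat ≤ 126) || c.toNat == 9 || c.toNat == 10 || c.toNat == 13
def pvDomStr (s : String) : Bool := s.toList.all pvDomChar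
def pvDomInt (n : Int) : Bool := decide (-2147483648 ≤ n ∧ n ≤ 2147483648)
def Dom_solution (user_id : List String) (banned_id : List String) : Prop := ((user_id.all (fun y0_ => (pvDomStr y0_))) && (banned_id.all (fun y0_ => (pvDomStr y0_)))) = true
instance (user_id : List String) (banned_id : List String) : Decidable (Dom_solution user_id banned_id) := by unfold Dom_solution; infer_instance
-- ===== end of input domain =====

-- B replaces A's depth-first route enumeration (all ordered routes, dedup at the very end)
-- by a layered breadth-first search over canonical sorted partial assignments, merging
-- states that use the same set of users as soon as they arise (alternative algorithm).

-- ===== PORT A =====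
-- check_is_candidate: the index loop 'for i in range(len(ban))' reading ban[i]/user[i] is
-- transliterated as simultaneous recursion over the two char lists; it is only called after
-- the length guard, so every index is in range and this is exact.
def checkLoopA : List Char → List Char → Bool
  | b :: bs, u :: us =>
      if b = '*' then checkLoopA bs us
      else if u ≠ b then false
      else checkLoopA bs us
  | _, _ => true

def checkIsCandidate (ban : String) (user : String) : Bool :=
  if PySem.Str.len user ≠ PySem.Str.len ban then false
  else checkLoopA ban.toList user.toList

-- the nested 'find' of A; visited is the dict user -> bool, route the list built so far
def findA (cands : PySem.Dict String (List String)) :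
    List String → PySem.Dict String Bool → List String → List (List String)
  | [], _, route => [route]
  | ban :: rest, visited, route =>
      (cands.getD ban []).foldl
        (fun result cand =>
          if visited.getD cand false then result
          else result ++ findA cands rest (visited.insert cand true) (route ++ [cand])) []

def solution (user_id : List String) (banned_id : List String) : Int :=
  let ban_candidates : PySem.Dict String (List String) :=
    banned_id.foldl
      (fun d ban =>
        if d.contains ban then d
        else d.insert ban
          (user_id.foldl (fun acc user => if checkIsCandidate ban user then acc ++ [user] else acc) []))
      PySem.Dict.empty
  let new_visited : PySem.Dict String Bool :=
    user_id.foldl (fun d user => d.insert user false) PySem.Dict.empty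
  let result := findA ban_candidates banned_id new_visited []
  -- 'result[i].sort()' then the route_str concatenation loop per route
  let temp : List String :=
    result.map (fun r =>
      (PySem.List.sorted r (fun x => x) false).foldl (fun s i => s ++ i) "")
  ((PySem.Set.ofList temp).length : Int)

-- ===== PORT B =====
def matchesB (ban : String) (user : String) : Bool :=
  PySem.Str.len user == PySem.Str.len ban &&
    (List.zip ban.toList user.toList).all (fun p => p.1 == '*' || p.1 == p.2)

def solution_alt (user_id : List String) (banned_id : List String) : Int :=
  let users := PySem.List.dedup user_id
  let states : PySem.Set (List String) :=
    banned_id.foldl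
      (fun states ban =>
        let cand := users.filter (fun u => matchesB ban u)
        states.foldl
          (fun ns s =>
            cand.foldl
              (fun ns u =>
                if u ∈ s then ns
                else PySem.Set.add ns (PySem.List.sorted (s ++ [u]) (fun x => x) false))
              ns)
          PySem.Set.empty)
      (PySem.Set.add PySem.Set.empty [])
  ((states.foldl (fun acc s => PySem.Set.add acc (PySem.Str.join "" s)) PySem.Set.empty).length : Int)

-- ===== PRECONDITION & SPEC =====
def Spec_solution (user_id : List String) (banned_id : List String) (out : Int) : Prop := out = solution_alt user_id banned_id
instance (user_id : List String) (banned_id : List String) (out : Int) : Decidable (Spec_solution user_id banned_id out) := by unfold Spec_solution; infer_instance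

-- ===== CLAIM (what is proved, stated in full; the proofs are below) =====
def Claim_equal_solution : Prop := ∀ (user_id : List String) (banned_id : List String), Dom_solution user_id banned_id → Spec_solution user_id banned_id (solution user_id banned_id)

-- ===== LEMMAS AND PROOFS =====

-- a valid extension of the partial choice 'pre' through the pattern list, picking from 'cand'
def ExtP (cand : String → List String) : List String → List String → List String → Prop
  | [], _, ext => ext = []
  | b :: bs, pre, ext => ∃ u t, ext = u :: t ∧ u ∈ cand b ∧ u ∉ pre ∧ ExtP cand bs (pre ++ [u]) t

theorem ExtP_congr (c1 c2 : String → List String) :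
    ∀ (bans pre pre' ext : List String),
      (∀ b ∈ bans, ∀ u, u ∈ c1 b ↔ u ∈ c2 b) →
      (∀ u, u ∈ pre ↔ u ∈ pre') →
      (ExtP c1 bans pre ext ↔ ExtP c2 bans pre' ext) := by
  intro bans
  induction bans with
  | nil => intro pre pre' ext _ _; simp [ExtP]
  | cons b bs ih =>
    intro pre pre' ext hc hp
    simp only [ExtP]
    constructor
    · rintro ⟨u, t, rfl, hu, hnp, he⟩
      exact ⟨u, t, rfl, (hc b (by simp) u).mp hu, fun h => hnp ((hp u).mpr h),
        (ih (pre ++ [u]) (pre' ++ [u]) t (fun b hb => hc b (by simp [hb]))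
          (fun v => by simp [hp v])).mp he⟩
    · rintro ⟨u, t, rfl, hu, hnp, he⟩
      exact ⟨u, t, rfl, (hc b (by simp) u).mpr hu, fun h => hnp ((hp u).mp h),
        (ih (pre ++ [u]) (pre' ++ [u]) t (fun b hb => hc b (by simp [hb]))
          (fun v => by simp [hp v])).mpr he⟩

-- A's manual 'route_str += i' loop computes "".join of the list
theorem foldl_append_eq_join (l : List String) :
    l.foldl (fun acc i => acc ++ i) "" = PySem.Str.join "" l := by
  have hflat : ∀ (L : List (List Char)), (List.intersperse ([] : List Char) L).flatten = L.flatten := by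
    intro L
    induction L with
    | nil => rfl
    | cons x xs ih =>
      cases xs with
      | nil => rfl
      | cons y ys => simpa using ih
  have h : ∀ (l : List String) (s : String),
      (l.foldl (fun acc i => acc ++ i) s).toList = s.toList ++ (l.map String.toList).flatten := by
    intro l
    induction l with
    | nil => simp
    | cons x xs ih => intro s; simp [ih, String.toList_append]
  apply String.toList_injective
  rw [h, PySem.Str.toList_join]
  simp [PySem.Chars.join, List.intercalate, hflat]

theorem check_eq_matches (ban user : String) :
    checkIsCandidate ban user = matchesB ban user := by
  unfold checkIsCandidate matchesB
  rw [PySem.Str.len_eq, PySem.Str.len_eq]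
  by_cases h : user.toList.length = ban.toList.length
  · simp only [h, ne_eq, not_true_eq_false]
    have : ∀ (bs us : List Char), us.length = bs.length →
        checkLoopA bs us = (List.zip bs us).all (fun p => p.1 == '*' || p.1 == p.2) := by
      intro bs
      induction bs with
      | nil => intro us h; cases us <;> simp_all [checkLoopA]
      | cons b bs ih =>
        intro us h
        cases us with
        | nil => simp at h
        | cons u us =>
          simp only [List.length_cons, Nat.add_right_cancel_iff] at h
          simp only [checkLoopA, List.zip_cons_cons, List.all_cons]
          by_cases hb : b = '*'
          · simp [hb, ih us h]
          · by_cases hu : u = b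
            · simp [hb, hu, ih us h]
            · simp [hb, hu, Ne.symm hu]
    rw [this ban.toList user.toList h]
    simp
  · rw [String.length_toList, String.length_toList] at h
    have hne : ((user.length : Int)) ≠ ((ban.length : Int)) := by exact_mod_cast h
    simp [hne]

-- the all-False visited dict built from user_id reads False everywhere
theorem visited0_getD (user_id : List String) (x : String) :
    (user_id.foldl (fun d user => d.insert user false) PySem.Dict.empty).getD x false = false := by
  suffices h : ∀ (d : PySem.Dict String Bool), d.getD x false = false →
      (user_id.foldl (fun d user => d.insert user false) d).getD x false = false by
    exact h PySem.Dict.empty (by simp [PySem.Dict.getD_empty])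
  induction user_id with
  | nil => intro d hd; simpa using hd
  | cons u us ih =>
    intro d hd
    simp only [List.foldl_cons]
    apply ih
    rw [PySem.Dict.getD_insert]
    split <;> simp [hd]

-- the candidate dict: getD is untouched at keys the dict already contains
theorem candsDict_getD_of_contains (f : String → List String) :
    ∀ (bs : List String) (d : PySem.Dict String (List String)) (b : String),
      d.contains b = true →
      (bs.foldl (fun d ban => if d.contains ban then d else d.insert ban (f ban)) d).getD b []
        = d.getD b [] := by
  intro bs
  induction bs with
  | nil => intro d b _; rfl
  | cons b' bs ih =>
    intro d b hb
    simp only [List.foldl_cons]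
    by_cases h : d.contains b' = true
    · rw [if_pos h]; exact ih d b hb
    · rw [if_neg h]
      have hne : b ≠ b' := by rintro rfl; rw [hb] at h; exact h rfl
      rw [ih _ b (by rw [PySem.Dict.contains_insert]; simp [hb])]
      rw [PySem.Dict.getD_insert]
      simp [hne]
  
theorem candsDict_getD (f : String → List String) :
    ∀ (bs : List String) (d : PySem.Dict String (List String)) (b : String),
      b ∈ bs → d.contains b = false →
      (bs.foldl (fun d ban => if d.contains ban then d else d.insert ban (f ban)) d).getD b []
        = f b := by
  intro bs
  induction bs with
  | nil => intro d b hb; simp at hb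
  | cons b' bs ih =>
    intro d b hb hc
    simp only [List.foldl_cons]
    by_cases h : d.contains b' = true
    · rw [if_pos h]
      have hbs : b ∈ bs := by
        rcases List.mem_cons.mp hb with rfl | hbs
        · rw [hc] at h; cases h
        · exact hbs
      exact ih d b hbs hc
    · rw [if_neg h]
      by_cases hbb : b = b'
      · subst hbb
        rw [candsDict_getD_of_contains f bs _ b (by simp [PySem.Dict.contains_insert_self])]
        exact PySem.Dict.getD_insert_self _ _ _ _
      · have hbs : b ∈ bs := by
          rcases List.mem_cons.mp hb with rfl | hbs
          · exact absurd rfl hbb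
          · exact hbs
        exact ih _ b hbs (by rw [PySem.Dict.contains_insert]; simp [hc, hbb])

-- membership in A's DFS result list
theorem mem_findA (cands : PySem.Dict String (List String)) :
    ∀ (bans : List String) (visited : PySem.Dict String Bool) (route : List String),
      (∀ u, visited.getD u false = decide (u ∈ route)) →
      ∀ m, m ∈ findA cands bans visited route ↔
        ∃ ext, ExtP (fun b => cands.getD b []) bans route ext ∧ m = route ++ ext := by
  intro bans
  induction bans with
  | nil =>
    intro visited route _ m
    simp [findA, ExtP, eq_comm]
  | cons b bs ih =>
    intro visited route hv m
    simp only [findA]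
    have hfold : ∀ (L : List String) (res : List (List String)),
        m ∈ L.foldl
          (fun result cand =>
            if visited.getD cand false then result
            else result ++ findA cands bs (visited.insert cand true) (route ++ [cand])) res
        ↔ m ∈ res ∨ ∃ u ∈ L, visited.getD u false = false ∧
            m ∈ findA cands bs (visited.insert u true) (route ++ [u]) := by
      intro L
      induction L with
      | nil => intro res; simp
      | cons u L ihL =>
        intro res
        simp only [List.foldl_cons]
        by_cases hu : visited.getD u false = true
        · rw [if_pos hu, ihL]
          constructor
          · rintro (h | ⟨v, hvL, hvv, hm⟩)
            · exact Or.inl h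
            · exact Or.inr ⟨v, by simp [hvL], hvv, hm⟩
          · rintro (h | ⟨v, hvL, hvv, hm⟩)
            · exact Or.inl h
            · rcases List.mem_cons.mp hvL with rfl | hvL'
              · rw [hu] at hvv; cases hvv
              · exact Or.inr ⟨v, hvL', hvv, hm⟩
        · rw [if_neg hu, ihL]
          rw [Bool.not_eq_true] at hu
          simp only [List.mem_append, List.mem_cons]
          constructor
          · rintro ((h | h) | ⟨v, hvL, hvv, hm⟩)
            · exact Or.inl h
            · exact Or.inr ⟨u, Or.inl rfl, hu, h⟩
            · exact Or.inr ⟨v, Or.inr hvL, hvv, hm⟩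
          · rintro (h | ⟨v, rfl | hvL, hvv, hm⟩)
            · exact Or.inl (Or.inl h)
            · exact Or.inl (Or.inr hm)
            · exact Or.inr ⟨v, hvL, hvv, hm⟩
    rw [hfold]
    simp only [List.not_mem_nil, false_or]
    constructor
    · rintro ⟨u, huL, hvv, hm⟩
      have hinv : ∀ v, (visited.insert u true).getD v false = decide (v ∈ route ++ [u]) := by
        intro v
        rw [PySem.Dict.getD_insert]
        by_cases hvu : v = u
        · simp [hvu]
        · simp [hvu, hv v]
      rcases (ih _ _ hinv m).mp hm with ⟨ext, hext, rfl⟩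
      refine ⟨u :: ext, ⟨u, ext, rfl, huL, ?_, hext⟩, by simp⟩
      · intro hmem
        have := hv u
        rw [hvv] at this
        simp [hmem] at this
    · rintro ⟨ext, ⟨u, t, rfl, huL, hup, hext⟩, rfl⟩
      have hinv : ∀ v, (visited.insert u true).getD v false = decide (v ∈ route ++ [u]) := by
        intro v
        rw [PySem.Dict.getD_insert]
        by_cases hvu : v = u
        · simp [hvu]
        · simp [hvu, hv v]
      refine ⟨u, huL, ?_, (ih _ _ hinv _).mpr ⟨t, hext, by simp⟩⟩
      rw [hv u]; simp [hup]

-- membership in one BFS layer of B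
theorem mem_layer (cand : List String) :
    ∀ (S init : List (List String)) (m : List String),
      m ∈ S.foldl
        (fun ns s =>
          cand.foldl
            (fun ns u =>
              if u ∈ s then ns
              else PySem.Set.add ns (PySem.List.sorted (s ++ [u]) (fun x => x) false))
            ns) init
      ↔ m ∈ init ∨ ∃ s ∈ S, ∃ u ∈ cand, u ∉ s ∧
          m = PySem.List.sorted (s ++ [u]) (fun x => x) false := by
  have hinner : ∀ (s : List String) (L : List String) (ns : List (List String)) (m : List String),
      m ∈ L.foldl
        (fun ns u =>
          if u ∈ s then ns
          else PySem.Set.add ns (PySem.List.sorted (s ++ [u]) (fun x => x) false)) ns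
      ↔ m ∈ ns ∨ ∃ u ∈ L, u ∉ s ∧ m = PySem.List.sorted (s ++ [u]) (fun x => x) false := by
    intro s L
    induction L with
    | nil => intro ns m; simp
    | cons u L ihL =>
      intro ns m
      simp only [List.foldl_cons]
      by_cases hu : u ∈ s
      · rw [if_pos hu, ihL]
        constructor
        · rintro (h | ⟨v, hvL, hvs, hm⟩)
          · exact Or.inl h
          · exact Or.inr ⟨v, by simp [hvL], hvs, hm⟩
        · rintro (h | ⟨v, hvL, hvs, hm⟩)
          · exact Or.inl h
          · rcases List.mem_cons.mp hvL with rfl | hvL'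
            · exact absurd hu hvs
            · exact Or.inr ⟨v, hvL', hvs, hm⟩
      · rw [if_neg hu, ihL]
        simp only [List.mem_cons]
        constructor
        · rintro (h | ⟨v, hvL, hvs, hm⟩)
          · rcases (PySem.Set.mem_add _ _ _).mp h with h | h
            · exact Or.inl h
            · exact Or.inr ⟨u, Or.inl rfl, hu, h⟩
          · exact Or.inr ⟨v, Or.inr hvL, hvs, hm⟩
        · rintro (h | ⟨v, rfl | hvL, hvs, hm⟩)
          · exact Or.inl ((PySem.Set.mem_add _ _ _).mpr (Or.inl h))
          · exact Or.inl ((PySem.Set.mem_add _ _ _).mpr (Or.inr hm))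
          · exact Or.inr ⟨v, hvL, hvs, hm⟩
  intro S
  induction S with
  | nil => intro init m; simp
  | cons s S ihS =>
    intro init m
    simp only [List.foldl_cons]
    rw [ihS, hinner]
    simp only [List.mem_cons]
    constructor
    · rintro ((h | ⟨u, huL, hus, hm⟩) | ⟨t, htS, u, huL, hus, hm⟩)
      · exact Or.inl h
      · exact Or.inr ⟨s, Or.inl rfl, u, huL, hus, hm⟩
      · exact Or.inr ⟨t, Or.inr htS, u, huL, hus, hm⟩
    · rintro (h | ⟨t, rfl | htS, u, huL, hus, hm⟩)
      · exact Or.inl (Or.inl h)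
      · exact Or.inl (Or.inr ⟨u, huL, hus, hm⟩)
      · exact Or.inr ⟨t, htS, u, huL, hus, hm⟩

-- sorting after appending one element to an already-sorted list
theorem sorted_sorted_append (pre : List String) (u : String) :
    PySem.List.sorted (PySem.List.sorted pre (fun x => x) false ++ [u]) (fun x => x) false
      = PySem.List.sorted (pre ++ [u]) (fun x => x) false := by
  apply PySem.List.sorted_eq_sorted_of_perm _ _ _ (fun a b h => h)
  exact (PySem.List.sorted_perm pre (fun x => x) false).append_right [u]

-- membership in B's state set after folding a pattern list
theorem states_char (cand : String → List String) :
    ∀ (bans : List String) (S : List (List String)) (R : List String → Prop),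
      (∀ x, x ∈ S ↔ ∃ pre, R pre ∧ x = PySem.List.sorted pre (fun x => x) false) →
      ∀ m, m ∈ bans.foldl
          (fun states ban =>
            states.foldl
              (fun ns s =>
                (cand ban).foldl
                  (fun ns u =>
                    if u ∈ s then ns
                    else PySem.Set.add ns (PySem.List.sorted (s ++ [u]) (fun x => x) false))
                  ns)
              PySem.Set.empty) S
        ↔ ∃ pre ext, R pre ∧ ExtP cand bans pre ext ∧
            m = PySem.List.sorted (pre ++ ext) (fun x => x) false := by
  intro bans
  induction bans with
  | nil =>
    intro S R hS m
    simp only [List.foldl_nil, hS m, ExtP]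
    constructor
    · rintro ⟨pre, hR, rfl⟩; exact ⟨pre, [], hR, rfl, by simp⟩
    · rintro ⟨pre, ext, hR, rfl, rfl⟩; exact ⟨pre, hR, by simp⟩
  | cons b bs ih =>
    intro S R hS m
    simp only [List.foldl_cons]
    rw [ih _ (fun pre' => ∃ pre u, R pre ∧ u ∈ cand b ∧ u ∉ pre ∧ pre' = pre ++ [u]) ?_]
    · constructor
      · rintro ⟨pre', ext, ⟨pre, u, hR, hu, hup, rfl⟩, hext, rfl⟩
        exact ⟨pre, u :: ext, hR, ⟨u, ext, rfl, hu, hup, hext⟩, by simp⟩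
      · rintro ⟨pre, ext, hR, ⟨u, t, rfl, hu, hup, hext⟩, rfl⟩
        exact ⟨pre ++ [u], t, ⟨pre, u, hR, hu, hup, rfl⟩, hext, by simp⟩
    · intro x
      rw [mem_layer]
      simp only [PySem.Set.empty, List.not_mem_nil, false_or]
      constructor
      · rintro ⟨s, hsS, u, hu, hus, rfl⟩
        rcases (hS s).mp hsS with ⟨pre, hR, rfl⟩
        refine ⟨pre ++ [u], ⟨pre, u, hR, hu, ?_, rfl⟩, (sorted_sorted_append pre u)⟩
        intro h; exact hus ((PySem.List.mem_sorted _ _ _ _).mpr h)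
      · rintro ⟨pre', ⟨pre, u, hR, hu, hup, rfl⟩, rfl⟩
        refine ⟨PySem.List.sorted pre (fun x => x) false, (hS _).mpr ⟨pre, hR, rfl⟩,
          u, hu, ?_, (sorted_sorted_append pre u).symm⟩
        intro h; exact hup ((PySem.List.mem_sorted _ _ _ _).mp h)

-- equal membership gives equally many distinct elements
theorem length_ofList_eq_of_mem_iff {l1 l2 : List String}
    (h : ∀ x, x ∈ l1 ↔ x ∈ l2) :
    (PySem.Set.ofList l1).length = (PySem.Set.ofList l2).length := by
  apply List.Perm.length_eq
  rw [List.perm_ext_iff_of_nodup (PySem.Set.nodup_ofList l1) (PySem.Set.nodup_ofList l2)]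
  intro x
  rw [PySem.Set.mem_ofList, PySem.Set.mem_ofList]
  exact h x

-- ===== VERDICT (by name: the statement is the Claim_ definition above) =====
theorem solution_spec : Claim_equal_solution := by
  intro user_id banned_id _
  unfold Spec_solution
  simp only [solution, solution_alt]
  -- name the two candidate functions
  set candsD : PySem.Dict String (List String) :=
    banned_id.foldl
      (fun d ban =>
        if d.contains ban then d
        else d.insert ban
          (user_id.foldl (fun acc user => if checkIsCandidate ban user then acc ++ [user] else acc) []))
      PySem.Dict.empty with hcandsD
  -- A's result characterization
  have hA : ∀ m, m ∈ findA candsD banned_id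
      (user_id.foldl (fun d user => d.insert user false) PySem.Dict.empty) []
      ↔ ExtP (fun b => candsD.getD b []) banned_id [] m := by
    intro m
    rw [mem_findA candsD banned_id _ [] (fun u => by rw [visited0_getD]; rfl) m]
    constructor
    · rintro ⟨ext, hext, rfl⟩; simpa using hext
    · intro h; exact ⟨m, h, by simp⟩
  -- B's states characterization
  have hB : ∀ m, m ∈ banned_id.foldl
      (fun states ban =>
        states.foldl
          (fun ns s =>
            ((PySem.List.dedup user_id).filter (fun u => matchesB ban u)).foldl
              (fun ns u =>
                if u ∈ s then ns
                else PySem.Set.add ns (PySem.List.sorted (s ++ [u]) (fun x => x) false))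
              ns)
          PySem.Set.empty)
      (PySem.Set.add PySem.Set.empty [])
      ↔ ∃ ext, ExtP (fun b => (PySem.List.dedup user_id).filter (fun u => matchesB b u)) banned_id [] ext ∧
          m = PySem.List.sorted ext (fun x => x) false := by
    intro m
    rw [states_char (fun b => (PySem.List.dedup user_id).filter (fun u => matchesB b u)) banned_id
      (PySem.Set.add PySem.Set.empty []) (fun pre => pre = [])
      (by intro x; constructor
          · intro hx
            refine ⟨[], rfl, ?_⟩
            simp [PySem.Set.add, PySem.Set.empty] at hx
            rw [hx]; rfl
          · rintro ⟨pre, rfl, rfl⟩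
            simp [PySem.Set.add, PySem.Set.empty]
            rfl) m]
    constructor
    · rintro ⟨pre, ext, rfl, hext, rfl⟩; exact ⟨ext, hext, by simp⟩
    · rintro ⟨ext, hext, rfl⟩; exact ⟨[], ext, rfl, hext, by simp⟩
  -- the two candidate functions agree in membership on patterns of banned_id
  have hcand : ∀ b ∈ banned_id, ∀ u,
      u ∈ candsD.getD b [] ↔ u ∈ (PySem.List.dedup user_id).filter (fun u => matchesB b u) := by
    intro b hb u
    rw [hcandsD, candsDict_getD _ banned_id PySem.Dict.empty b hb (by simp)]
    have hfil : user_id.foldl (fun acc user => if checkIsCandidate b user then acc ++ [user] else acc) []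
        = user_id.filter (fun u => matchesB b u) := by
      have h1 := PySem.List.foldl_append_if (fun u => checkIsCandidate b u) (fun u => u) user_id []
      have h2 : user_id.filter (fun u => checkIsCandidate b u)
          = user_id.filter (fun u => matchesB b u) := by
        simp only [check_eq_matches]
      simpa [h2] using h1
    rw [hfil]
    simp [List.mem_filter]
  -- same extensions on both sides
  have hExt : ∀ r, ExtP (fun b => candsD.getD b []) banned_id [] r ↔
      ExtP (fun b => (PySem.List.dedup user_id).filter (fun u => matchesB b u)) banned_id [] r := by
    intro r
    exact ExtP_congr _ _ banned_id [] [] r hcand (fun u => Iff.rfl)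
  -- B's final fold is set(map join states)
  rw [show (fun (acc : PySem.Set String) (s : List String) => PySem.Set.add acc (PySem.Str.join "" s))
      = (fun (acc : PySem.Set String) (s : List String) => PySem.Set.add acc ((fun s => PySem.Str.join "" s) s)) from rfl]
  rw [← PySem.Set.update_map_eq_foldl_add, PySem.Set.update_empty]
  -- A's per-route concatenation is join
  have htemp : (findA candsD banned_id
        (user_id.foldl (fun d user => d.insert user false) PySem.Dict.empty) []).map
      (fun r => (PySem.List.sorted r (fun x => x) false).foldl (fun s i => s ++ i) "")
      = (findA candsD banned_id
        (user_id.foldl (fun d user => d.insert user false) PySem.Dict.empty) []).map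
      (fun r => PySem.Str.join "" (PySem.List.sorted r (fun x => x) false)) := by
    apply List.map_congr_left
    intro r _
    exact foldl_append_eq_join _
  rw [htemp]
  congr 1
  apply length_ofList_eq_of_mem_iff
  intro x
  simp only [List.mem_map]
  constructor
  · rintro ⟨r, hr, rfl⟩
    have h := (hExt r).mp ((hA r).mp hr)
    exact ⟨PySem.List.sorted r (fun x => x) false, (hB _).mpr ⟨r, h, rfl⟩, rfl⟩
  · rintro ⟨s, hs, rfl⟩
    rcases (hB s).mp hs with ⟨ext, hext, rfl⟩
    exact ⟨ext, (hA ext).mpr ((hExt ext).mpr hext), rfl⟩
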